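-- pv_equiv track=rewrite | github.com/kmkurn/msc-project | scripts/remove_unseen_unk.py | get_unk_tokens
-- ===== SOURCE A (Python) =====
-- def get_unk_tokens(lines):
--     k = 0
--     for line in lines:
--         line = line.strip()
--         if k == 2:
--             yield from (token for token in line.split() if token.startswith('UNK'))
--         if not line:
--             k = 0
--         else:
--             k += 1
-- ===== SOURCE B (Python) =====
-- def get_unk_tokens(lines):
--     # Two-phase: first collect blocks of consecutive non-empty (stripped) lines,
--     # then emit UNK tokens from the third line of each block of length >= 3.
--     blocks = []
--     cur = []
--     for line in lines:
--         s = line.strip()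
--         if s:
--             cur.append(s)
--         elif cur:
--             blocks.append(cur)
--             cur = []
--     if cur:
--         blocks.append(cur)
--     for block in blocks:
--         if len(block) >= 3:
--             for t in block[2].split():
--                 if t.startswith('UNK'):
--                     yield t
-- ===== Notes on version B (the rewrite author's own statement) =====
-- stated objective: alternative
-- what changed: Replaces the per-line counter state machine (emit when k==2) with a two-phase pass: group consecutive non-empty lines into blocks, then emit UNK tokens from the third line of each block with at least three lines.
import Mathlib
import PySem

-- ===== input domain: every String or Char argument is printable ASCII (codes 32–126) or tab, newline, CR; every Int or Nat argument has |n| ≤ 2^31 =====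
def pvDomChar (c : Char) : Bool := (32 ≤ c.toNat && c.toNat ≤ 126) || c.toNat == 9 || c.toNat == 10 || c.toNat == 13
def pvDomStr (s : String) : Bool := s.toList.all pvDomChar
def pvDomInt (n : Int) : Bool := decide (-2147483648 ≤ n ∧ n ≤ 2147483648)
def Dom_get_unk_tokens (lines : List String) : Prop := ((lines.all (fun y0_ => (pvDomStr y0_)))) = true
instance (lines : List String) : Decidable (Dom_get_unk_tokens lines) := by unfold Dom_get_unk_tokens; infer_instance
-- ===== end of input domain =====

-- B replaces A's per-line counter state machine with a two-phase pass (collect blocks of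
-- consecutive non-empty lines, then emit UNK tokens from the third line of each block): an
-- alternative decomposition of the same O(n) task.


-- ===== PORT A =====
-- 'token for token in line.split() if token.startswith("UNK")' (used verbatim by both Pythons)
def pvUnk (s : String) : List String :=
  (PySem.Str.split₀ s).filter (fun t => PySem.Str.startswith t "UNK")

-- A's loop: state k, emit when k == 2, reset on blank line
def pvGoA (k : Int) : List String → List String
  | [] => []
  | l :: ls =>
    let line := PySem.Str.strip l
    (if k = 2 then pvUnk line else []) ++
      (if line = "" then pvGoA 0 ls else pvGoA (k + 1) ls)

def get_unk_tokens (lines : List String) : List String :=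
  pvGoA 0 lines

-- ===== PORT B =====
-- phase 1 of Source B: blocks of consecutive non-empty stripped lines (cur is the open block)
def pvBlocksAux : List String → List String → List (List String)
  | [], cur => if cur = [] then [] else [cur]
  | l :: ls, cur =>
    let s := PySem.Str.strip l
    if s = "" then
      if cur = [] then pvBlocksAux ls [] else cur :: pvBlocksAux ls []
    else pvBlocksAux ls (cur ++ [s])

-- phase 2 of Source B: UNK tokens of block[2] for each block with len(block) >= 3
def get_unk_tokens_alt (lines : List String) : List String :=
  (pvBlocksAux lines []).flatMap
    (fun b => if 3 ≤ b.length then pvUnk (b.getD 2 "") else [])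

-- ===== PRECONDITION & SPEC =====
def Spec_get_unk_tokens (lines : List String) (out : List String) : Prop := out = get_unk_tokens_alt lines
instance (lines : List String) (out : List String) : Decidable (Spec_get_unk_tokens lines out) := by unfold Spec_get_unk_tokens; infer_instance

-- ===== CLAIM (what is proved, stated in full; the proofs are below) =====
def Claim_equal_get_unk_tokens : Prop := ∀ (lines : List String), Dom_get_unk_tokens lines → Spec_get_unk_tokens lines (get_unk_tokens lines)

-- ===== LEMMAS AND PROOFS =====

-- splitting the empty string yields no tokens
theorem pvUnk_empty : pvUnk "" = [] := by decide

-- invariant: with an open block `cur`, B's remaining emission is the pending third-line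
-- emission of the current block followed by A's emission from state k = cur.length
theorem pvBlocks_goA (ls : List String) : ∀ (cur : List String),
    (pvBlocksAux ls cur).flatMap
        (fun b => if 3 ≤ b.length then pvUnk (b.getD 2 "") else [])
      = (if 3 ≤ cur.length then pvUnk (cur.getD 2 "") else [])
          ++ pvGoA (cur.length : Int) ls := by
  induction ls with
  | nil =>
    intro cur
    simp only [pvBlocksAux, pvGoA]
    by_cases h : cur = []
    · simp [h]
    · simp [h]
  | cons l ls ih =>
    intro cur
    simp only [pvBlocksAux, pvGoA]
    by_cases hb : PySem.Str.strip l = ""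
    · -- blank line: close the block (if any), A resets k to 0
      by_cases h : cur = []
      · simpa [hb, h, pvUnk_empty] using ih []
      · simp only [hb, h, if_true, if_false, List.flatMap_cons, ih []]
        by_cases hk : (cur.length : Int) = 2
        · have : cur.length = 2 := by omega
          simp [this, pvUnk_empty]
        · simp only [hk, if_false, List.nil_append]
          simp
    · -- non-empty line: extend the block, A increments k
      rw [if_neg hb, ih (cur ++ [PySem.Str.strip l])]
      have hlen : (cur ++ [PySem.Str.strip l]).length = cur.length + 1 := by simp
      rw [hlen]
      have hc : ((cur.length + 1 : Nat) : Int) = (cur.length : Int) + 1 := by push_cast; ring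
      rw [hc]
      by_cases hk2 : cur.length = 2
      · -- third line of the block: B's pending emission is exactly this line
        have hget : (cur ++ [PySem.Str.strip l]).getD 2 "" = PySem.Str.strip l := by
          simp [List.getD, hk2]
        have hne3 : ¬ 3 ≤ cur.length := by omega
        have h31 : 3 ≤ cur.length + 1 := by omega
        have hki : (cur.length : Int) = 2 := by omega
        rw [if_pos h31, if_neg hne3, if_pos hki, hget, List.nil_append, if_neg hb]
      · by_cases h3 : 3 ≤ cur.length
        · -- block already past its third line: pending emission unchanged
          have hget : (cur ++ [PySem.Str.strip l]).getD 2 "" = cur.getD 2 "" := by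
            have h2 : 2 < cur.length := by omega
            simp [List.getD, List.getElem?_append_left h2]
          have hne : ¬ ((cur.length : Int) = 2) := by omega
          have h31 : 3 ≤ cur.length + 1 := by omega
          rw [if_pos h31, if_pos h3, if_neg hne, hget, List.nil_append, if_neg hb]
        · -- block still short: nothing pending on either side
          have h4 : ¬ 3 ≤ cur.length + 1 := by omega
          have hne : ¬ ((cur.length : Int) = 2) := by omega
          rw [if_neg h4, if_neg h3, if_neg hne, if_neg hb, List.nil_append, List.nil_append]

-- ===== VERDICT (by name: the statement is the Claim_ definition above) =====
theorem get_unk_tokens_spec : Claim_equal_get_unk_tokens := by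
  intro lines _
  unfold Spec_get_unk_tokens get_unk_tokens get_unk_tokens_alt
  simpa using (pvBlocks_goA lines []).symm
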